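-- pv_equiv track=rewrite | github.com/PI-33/CURE | optimization/execute.py | get_chunk_indices
-- ===== SOURCE A (Python) =====
-- def get_chunk_indices(n, num_chunks):
--     chunk_size = n // num_chunks
--     remainder = n % num_chunks
--     indices = []
--     start = 0
--     for i in range(num_chunks):
--         extra = 1 if i < remainder else 0
--         end = start + chunk_size + extra
--         indices.append((start, end))
--         start = end
--     return indices
-- ===== SOURCE B (Python) =====
-- def get_chunk_indices(n, num_chunks):
--     chunk_size = n // num_chunks
--     remainder = n % num_chunks
--     return [(i * chunk_size + min(i, remainder),
--              (i + 1) * chunk_size + min(i + 1, remainder))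
--             for i in range(num_chunks)]
-- ===== Notes on version B (the rewrite author's own statement) =====
-- stated objective: simpler
-- what changed: Replaced the loop with a carried start accumulator by a list comprehension computing each interval boundary independently from the closed form i*chunk_size + min(i, remainder).
import Mathlib
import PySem

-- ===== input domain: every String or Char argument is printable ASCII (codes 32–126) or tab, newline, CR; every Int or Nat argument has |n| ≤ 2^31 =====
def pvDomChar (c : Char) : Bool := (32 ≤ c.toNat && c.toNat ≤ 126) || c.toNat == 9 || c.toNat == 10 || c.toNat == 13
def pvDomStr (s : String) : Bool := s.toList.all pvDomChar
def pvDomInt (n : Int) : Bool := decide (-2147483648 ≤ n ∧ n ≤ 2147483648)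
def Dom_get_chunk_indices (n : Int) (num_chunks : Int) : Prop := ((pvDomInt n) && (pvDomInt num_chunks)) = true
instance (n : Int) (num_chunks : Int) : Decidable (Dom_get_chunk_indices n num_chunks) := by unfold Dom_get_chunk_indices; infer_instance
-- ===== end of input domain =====

-- B replaces A's carried `start` accumulator by a closed-form comprehension (simpler); equal on all num_chunks ≠ 0.


-- ===== PORT A =====
def get_chunk_indices (n : Int) (num_chunks : Int) : List (Int × Int) :=
  let chunk_size := PySem.Int.floordiv n num_chunks
  let remainder := PySem.Int.mod n num_chunks
  let st := (PySem.List.pyRange 0 num_chunks 1).foldl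
    (fun (acc : List (Int × Int) × Int) i =>
      let extra : Int := if i < remainder then 1 else 0
      let e := acc.2 + chunk_size + extra
      (acc.1 ++ [(acc.2, e)], e)) ([], 0)
  st.1

-- ===== PORT B =====
def get_chunk_indices_alt (n : Int) (num_chunks : Int) : List (Int × Int) :=
  let chunk_size := PySem.Int.floordiv n num_chunks
  let remainder := PySem.Int.mod n num_chunks
  (PySem.List.pyRange 0 num_chunks 1).map
    (fun i => (i * chunk_size + min i remainder,
               (i + 1) * chunk_size + min (i + 1) remainder))

-- ===== PRECONDITION & SPEC =====
-- Pre_ excludes exactly num_chunks = 0, where Python A raises ZeroDivisionError (B raises too).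
def Pre_get_chunk_indices (n : Int) (num_chunks : Int) : Prop := num_chunks ≠ 0
instance (n : Int) (num_chunks : Int) : Decidable (Pre_get_chunk_indices n num_chunks) := by unfold Pre_get_chunk_indices; infer_instance
def pvWitness_get_chunk_indices : Int × Int := (10, 3)

def Spec_get_chunk_indices (n : Int) (num_chunks : Int) (out : List (Int × Int)) : Prop := out = get_chunk_indices_alt n num_chunks
instance (n : Int) (num_chunks : Int) (out : List (Int × Int)) : Decidable (Spec_get_chunk_indices n num_chunks out) := by unfold Spec_get_chunk_indices; infer_instance

-- ===== CLAIM (what is proved, stated in full; the proofs are below) =====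
def Claim_equal_get_chunk_indices : Prop := ∀ (n : Int) (num_chunks : Int), Dom_get_chunk_indices n num_chunks → Pre_get_chunk_indices n num_chunks → Spec_get_chunk_indices n num_chunks (get_chunk_indices n num_chunks)

-- ===== LEMMAS AND PROOFS =====

-- Invariant: after folding range(0, m), A's state is (B's first m pairs, m*cs + min m r).
theorem pv_fold_inv (cs r : Int) (hr : 0 ≤ r) (m : Nat) :
    (PySem.List.pyRange 0 (m : Int) 1).foldl
      (fun (acc : List (Int × Int) × Int) i =>
        let extra : Int := if i < r then 1 else 0
        let e := acc.2 + cs + extra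
        (acc.1 ++ [(acc.2, e)], e)) ([], 0)
    = ((PySem.List.pyRange 0 (m : Int) 1).map
        (fun i => (i * cs + min i r, (i + 1) * cs + min (i + 1) r)),
       (m : Int) * cs + min (m : Int) r) := by
  induction m with
  | zero =>
      simp [PySem.List.pyRange_one_eq_nil (by omega : (0:Int) ≤ 0)]
      omega
  | succ k ih =>
      have hsplit : PySem.List.pyRange 0 ((k+1 : Nat) : Int) 1
          = PySem.List.pyRange 0 (k : Int) 1 ++ [(k : Int)] := by
        push_cast
        exact PySem.List.pyRange_one_succ_right (by positivity)
      rw [hsplit, List.foldl_append, ih, List.map_append]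
      simp only [List.foldl_cons, List.foldl_nil, List.map_cons, List.map_nil]
      have key : (k:Int) * cs + min (k:Int) r + cs + (if (k:Int) < r then 1 else 0)
          = ((k:Int) + 1) * cs + min ((k:Int) + 1) r := by
        rw [add_one_mul]; split_ifs with h <;> omega
      push_cast
      rw [key]

-- ===== VERDICT (by name: the statement is the Claim_ definition above) =====
theorem get_chunk_indices_spec : Claim_equal_get_chunk_indices := by
  intro n num_chunks _ hpre
  unfold Spec_get_chunk_indices get_chunk_indices get_chunk_indices_alt
  by_cases hpos : 0 < num_chunks
  · have hr : 0 ≤ PySem.Int.mod n num_chunks := by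
      rw [PySem.Int.mod_eq_emod_of_pos hpos]
      exact Int.emod_nonneg n (by omega)
    have hm : ((num_chunks.toNat : Nat) : Int) = num_chunks := by omega
    have := pv_fold_inv (PySem.Int.floordiv n num_chunks) (PySem.Int.mod n num_chunks) hr num_chunks.toNat
    rw [hm] at this
    simp only [this]
  · have hnil : PySem.List.pyRange 0 num_chunks 1 = [] :=
      PySem.List.pyRange_one_eq_nil (by omega)
    simp [hnil]
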